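-- pv_equiv track=rewrite | github.com/Saisanjaychikkala/codemind-python | Airport__authority.py | weight_machine
-- ===== SOURCE A (Python) =====
-- def weight_machine(n,w,t):
--     c=0
--     for i in w:
--         if i<=t:
--             c+=1
--         else:
--             c+=2
--     return c
-- ===== SOURCE B (Python) =====
-- def weight_machine(n, w, t):
--     # divide-and-conquer: recursively split the index range in half;
--     # a singleton range weighs 2 minus (1 if the element is within threshold)
--     def go(lo, hi):
--         if hi - lo == 0:
--             return 0
--         if hi - lo == 1:
--             return 2 - (w[lo] <= t)
--         mid = (lo + hi) // 2
--         return go(lo, mid) + go(mid, hi)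
--     return go(0, len(w))
-- ===== Notes on version B (the rewrite author's own statement) =====
-- stated objective: alternative
-- what changed: Replaces the left-to-right branching +1/+2 accumulator loop with a divide-and-conquer recursion that splits the index range in half and sums the two halves, with singleton base case 2 - (w[lo] <= t).
import Mathlib
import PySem

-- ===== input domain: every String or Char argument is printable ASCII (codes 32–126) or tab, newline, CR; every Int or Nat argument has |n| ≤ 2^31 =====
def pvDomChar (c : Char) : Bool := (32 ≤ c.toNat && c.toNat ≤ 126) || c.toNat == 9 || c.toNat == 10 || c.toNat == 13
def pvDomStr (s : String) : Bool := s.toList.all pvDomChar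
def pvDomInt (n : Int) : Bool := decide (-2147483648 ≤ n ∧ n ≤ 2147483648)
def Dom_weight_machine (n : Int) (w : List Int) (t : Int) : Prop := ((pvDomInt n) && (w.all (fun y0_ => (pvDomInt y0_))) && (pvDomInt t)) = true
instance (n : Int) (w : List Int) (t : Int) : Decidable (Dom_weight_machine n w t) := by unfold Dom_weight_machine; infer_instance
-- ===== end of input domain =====

-- B replaces A's left-to-right branching accumulator with a divide-and-conquer
-- recursion over index ranges (alternative decomposition, same cost).

-- ===== PORT A =====
def weight_machine (n : Int) (w : List Int) (t : Int) : Int :=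
  w.foldl (fun c i => if i ≤ t then c + 1 else c + 2) 0

-- ===== PORT B =====
-- helper go(lo, hi) of Source B; w[lo] is always in range when called from weight_machine_alt
def wmGo (w : List Int) (t : Int) (lo hi : Nat) : Int :=
  if _h0 : hi - lo = 0 then 0
  else if _h1 : hi - lo = 1 then 2 - (if w.getD lo 0 ≤ t then 1 else 0)
  else
    wmGo w t lo ((lo + hi) / 2) + wmGo w t ((lo + hi) / 2) hi
termination_by hi - lo
decreasing_by all_goals omega

def weight_machine_alt (n : Int) (w : List Int) (t : Int) : Int :=
  wmGo w t 0 w.length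

-- ===== PRECONDITION & SPEC =====
def Spec_weight_machine (n : Int) (w : List Int) (t : Int) (out : Int) : Prop := out = weight_machine_alt n w t
instance (n : Int) (w : List Int) (t : Int) (out : Int) : Decidable (Spec_weight_machine n w t out) := by unfold Spec_weight_machine; infer_instance

-- ===== CLAIM (what is proved, stated in full; the proofs are below) =====
def Claim_equal_weight_machine : Prop := ∀ (n : Int) (w : List Int) (t : Int), Dom_weight_machine n w t → Spec_weight_machine n w t (weight_machine n w t)

-- ===== LEMMAS AND PROOFS =====
theorem wm_foldl_shift (t : Int) (xs : List Int) (c : Int) :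
    xs.foldl (fun c i => if i ≤ t then c + 1 else c + 2) c
      = c + xs.foldl (fun c i => if i ≤ t then c + 1 else c + 2) 0 := by
  induction xs generalizing c with
  | nil => simp
  | cons x xs ih =>
    simp only [List.foldl_cons]
    rw [ih, ih (if x ≤ t then (0:Int) + 1 else 0 + 2)]
    split_ifs <;> ring

theorem wm_foldl_append (t : Int) (xs ys : List Int) :
    (xs ++ ys).foldl (fun (c : Int) i => if i ≤ t then c + 1 else c + 2) 0
      = xs.foldl (fun (c : Int) i => if i ≤ t then c + 1 else c + 2) 0
        + ys.foldl (fun (c : Int) i => if i ≤ t then c + 1 else c + 2) 0 := by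
  rw [List.foldl_append]
  exact wm_foldl_shift t ys (xs.foldl (fun c i => if i ≤ t then c + 1 else c + 2) 0)

theorem wmGo_eq (w : List Int) (t : Int) (lo hi : Nat)
    (h1 : lo ≤ hi) (h2 : hi ≤ w.length) :
    wmGo w t lo hi
      = ((w.drop lo).take (hi - lo)).foldl (fun c i => if i ≤ t then c + 1 else c + 2) 0 := by
  induction lo, hi using wmGo.induct with
  | case1 lo hi h0 =>
    rw [wmGo]
    simp [h0]
  | case2 lo hi h0 hh1 =>
    rw [wmGo]
    have hlt : lo < w.length := by omega
    rw [dif_neg h0, dif_pos hh1, hh1, List.drop_eq_getElem_cons hlt]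
    simp only [List.take_succ_cons, List.take_zero, List.foldl_cons, List.foldl_nil]
    rw [List.getD_eq_getElem w 0 hlt]
    split_ifs <;> ring
  | case3 lo hi h0 hh1 ih1 ih2 =>
    rw [wmGo]
    rw [dif_neg h0, dif_neg hh1]
    have hm1 : lo ≤ (lo + hi) / 2 := by omega
    have hm2 : (lo + hi) / 2 ≤ hi := by omega
    rw [ih1 hm1 (le_trans hm2 h2), ih2 hm2 h2]
    have hsplit : (w.drop lo).take (hi - lo)
        = (w.drop lo).take ((lo + hi) / 2 - lo)
          ++ (w.drop ((lo + hi) / 2)).take (hi - (lo + hi) / 2) := by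
      have e1 : hi - lo = ((lo + hi) / 2 - lo) + (hi - (lo + hi) / 2) := by omega
      have e2 : lo + ((lo + hi) / 2 - lo) = (lo + hi) / 2 := by omega
      rw [e1, List.take_add, List.drop_drop, e2]
    rw [hsplit]
    exact (wm_foldl_append t _ _).symm

-- ===== VERDICT (by name: the statement is the Claim_ definition above) =====
theorem weight_machine_spec : Claim_equal_weight_machine := by
  intro n w t _
  unfold Spec_weight_machine weight_machine weight_machine_alt
  rw [wmGo_eq w t 0 w.length (Nat.zero_le _) le_rfl]
  simp
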